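-- pv_equiv track=rewrite | github.com/LeonardoFGaldino/Axxen-Scripts | script retificação mais utilizados com retificador final/0150, 0190, 0500 Full.py | insert_0150_after_0140
-- ===== SOURCE A (Python) =====
-- def insert_0150_after_0140(linhas, registros_0150):
--     """Insere registros 0150 após o último registro 0140 e antes do primeiro registro 0190 em um arquivo SPED."""
--     novo_conteudo = []
--     inseriu_0150 = False
--     pos_0140 = 0
--
--     for i, linha in enumerate(linhas):
--         novo_conteudo.append(linha)
--         if linha.startswith('|0140|'):
--             pos_0140 = len(novo_conteudo)
--         elif linha.startswith('|0190|') and not inseriu_0150: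
--             novo_conteudo = novo_conteudo[:pos_0140] + registros_0150 + novo_conteudo[pos_0140:]
--             inseriu_0150 = True
--
--     if not inseriu_0150:
--         novo_conteudo = novo_conteudo[:pos_0140] + registros_0150 + novo_conteudo[pos_0140:]
--
--     return novo_conteudo
-- ===== SOURCE B (Python) =====
-- def insert_0150_after_0140(linhas, registros_0150):
--     """Locate the insertion point, then splice once."""
--     first190 = next((i for i, l in enumerate(linhas) if l.startswith('|0190|')), len(linhas))
--     idx = 0
--     for i, l in enumerate(linhas[:first190]):
--         if l.startswith('|0140|'):
--             idx = i + 1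
--     return linhas[:idx] + registros_0150 + linhas[idx:]
-- ===== Notes on version B (the rewrite author's own statement) =====
-- stated objective: simpler
-- what changed: B computes the insertion index (last '|0140|' line before the first '|0190|' line, or 0) in a separate scan and splices registros_0150 into linhas with a single slice, instead of A's single pass that rebuilds the list line by line while tracking an inserted-flag and splicing mid-loop or after the loop.
import Mathlib
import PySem

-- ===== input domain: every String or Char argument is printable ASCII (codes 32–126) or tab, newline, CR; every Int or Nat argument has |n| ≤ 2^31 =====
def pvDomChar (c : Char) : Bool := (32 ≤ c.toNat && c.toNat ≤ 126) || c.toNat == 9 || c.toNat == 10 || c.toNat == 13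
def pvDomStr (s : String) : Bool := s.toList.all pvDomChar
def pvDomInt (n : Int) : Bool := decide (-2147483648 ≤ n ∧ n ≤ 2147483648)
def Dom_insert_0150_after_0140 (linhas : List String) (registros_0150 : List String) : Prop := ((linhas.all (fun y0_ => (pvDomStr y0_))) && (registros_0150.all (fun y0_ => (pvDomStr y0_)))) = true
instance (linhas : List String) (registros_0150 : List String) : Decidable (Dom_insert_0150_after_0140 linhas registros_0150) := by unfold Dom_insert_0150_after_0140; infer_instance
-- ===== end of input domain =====

-- B locates the insertion index in a separate scan and splices once; A rebuilds the list in one pass with an inserted-flag. Equal on all inputs.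

-- shared helpers: the two line tests ("linha.startswith('|0140|')" / "…'|0190|'")
def pvP140 (l : String) : Bool := PySem.Str.startswith l "|0140|"
def pvP190 (l : String) : Bool := PySem.Str.startswith l "|0190|"

-- ===== PORT A =====
-- loop body over state (novo_conteudo, inseriu_0150, pos_0140); slices novo[:p]/novo[p:] with 0 ≤ p ≤ len(novo) are exactly take/drop
def pvStepA (reg : List String) (s : List String × Bool × Nat) (linha : String) : List String × Bool × Nat :=
  let novo := s.1 ++ [linha]
  if pvP140 linha then (novo, s.2.1, novo.length)
  else if pvP190 linha && !s.2.1 then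
    (novo.take s.2.2 ++ reg ++ novo.drop s.2.2, true, s.2.2)
  else (novo, s.2.1, s.2.2)

-- the post-loop "if not inseriu_0150: splice"
def pvFinishA (reg : List String) (st : List String × Bool × Nat) : List String :=
  if !st.2.1 then st.1.take st.2.2 ++ reg ++ st.1.drop st.2.2 else st.1

def insert_0150_after_0140 (linhas : List String) (registros_0150 : List String) : List String :=
  pvFinishA registros_0150 (linhas.foldl (pvStepA registros_0150) ([], false, 0))

-- ===== PORT B =====
-- first190 = index of the first '|0190|' line (len(linhas) if none) = List.findIdx; then the last-'|0140|' scan over linhas[:first190]; one splice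
def insert_0150_after_0140_alt (linhas : List String) (registros_0150 : List String) : List String :=
  let first190 := linhas.findIdx pvP190
  let idx := ((linhas.take first190).zipIdx).foldl
    (fun idx p => if pvP140 p.1 then p.2 + 1 else idx) 0
  linhas.take idx ++ registros_0150 ++ linhas.drop idx

-- ===== PRECONDITION & SPEC =====
def Spec_insert_0150_after_0140 (linhas : List String) (registros_0150 : List String) (out : List String) : Prop := out = insert_0150_after_0140_alt linhas registros_0150
instance (linhas : List String) (registros_0150 : List String) (out : List String) : Decidable (Spec_insert_0150_after_0140 linhas registros_0150 out) := by unfold Spec_insert_0150_after_0140; infer_instance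

-- ===== CLAIM (what is proved, stated in full; the proofs are below) =====
def Claim_equal_insert_0150_after_0140 : Prop := ∀ (linhas : List String) (registros_0150 : List String), Dom_insert_0150_after_0140 linhas registros_0150 → Spec_insert_0150_after_0140 linhas registros_0150 (insert_0150_after_0140 linhas registros_0150)

-- ===== LEMMAS AND PROOFS =====

-- insertion index: absolute position i, current best; stops at the first '|0190|'
def pvK (lines : List String) (i best : Nat) : Nat :=
  match lines with
  | [] => best
  | l :: r =>
    if pvP140 l then pvK r (i + 1) (i + 1)
    else if pvP190 l then best
    else pvK r (i + 1) best

theorem pvNot_both (l : String) (h4 : pvP140 l = true) (h9 : pvP190 l = true) : False := by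
  unfold pvP140 at h4; unfold pvP190 at h9
  rw [PySem.Str.startswith_eq, PySem.Chars.startswith_iff] at h4 h9
  obtain ⟨t4, e4⟩ := h4
  obtain ⟨t9, e9⟩ := h9
  have h := congrArg (fun L => List.take 6 L) (e4.trans e9.symm)
  simp at h

-- once inseriu is true the fold only appends lines and the final splice is skipped
theorem pvA_done (reg : List String) (rest acc : List String) (p : Nat) :
    (rest.foldl (pvStepA reg) (acc, true, p)).1 = acc ++ rest ∧
    (rest.foldl (pvStepA reg) (acc, true, p)).2.1 = true := by
  induction rest generalizing acc p with
  | nil => simp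
  | cons l r ih =>
    simp only [List.foldl_cons, pvStepA]
    split_ifs with h1 h2 <;> simp_all

-- main invariant for A's fold in the not-yet-inserted phase
theorem pvA_inv (reg : List String) (rest acc : List String) (p : Nat) (hp : p ≤ acc.length) :
    pvFinishA reg (rest.foldl (pvStepA reg) (acc, false, p)) =
    (acc ++ rest).take (pvK rest acc.length p) ++ reg ++ (acc ++ rest).drop (pvK rest acc.length p) := by
  induction rest generalizing acc p with
  | nil =>
    simp only [List.foldl_nil, pvFinishA, pvK, List.append_nil, Bool.not_false, if_pos]
  | cons l r ih =>
    simp only [List.foldl_cons]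
    by_cases h4 : pvP140 l = true
    · -- '|0140|' line
      rw [show pvStepA reg (acc, false, p) l = (acc ++ [l], false, (acc ++ [l]).length) by
        simp [pvStepA, h4]]
      rw [ih (acc ++ [l]) ((acc ++ [l]).length) (le_refl _)]
      simp [pvK, h4, List.append_assoc]
    · by_cases h9 : pvP190 l = true
      · -- first '|0190|' line: insertion happens here, the rest is appended verbatim
        rw [show pvStepA reg (acc, false, p) l =
            ((acc ++ [l]).take p ++ reg ++ (acc ++ [l]).drop p, true, p) by
          simp [pvStepA, h4, h9]]
        have hd := pvA_done reg r ((acc ++ [l]).take p ++ reg ++ (acc ++ [l]).drop p) p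
        rw [pvFinishA, hd.2]
        simp only [Bool.not_true, Bool.false_eq_true, if_false, hd.1, pvK, h4, h9, if_pos]
        rw [List.take_append_of_le_length hp, List.take_append_of_le_length hp,
            List.drop_append_of_le_length hp, List.drop_append_of_le_length hp]
        simp
      · -- ordinary line
        rw [show pvStepA reg (acc, false, p) l = (acc ++ [l], false, p) by
          simp [pvStepA, h4, h9]]
        have hp' : p ≤ (acc ++ [l]).length := by simp; omega
        rw [ih (acc ++ [l]) p hp']
        simp [pvK, h4, h9, List.append_assoc]

theorem pvA_eq_splice (linhas reg : List String) :
    insert_0150_after_0140 linhas reg =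
    linhas.take (pvK linhas 0 0) ++ reg ++ linhas.drop (pvK linhas 0 0) := by
  have := pvA_inv reg linhas [] 0 (by simp)
  simpa [insert_0150_after_0140] using this

-- B's two scans compute pvK
theorem pvB_idx (lines : List String) (i best : Nat) :
    ((lines.take (lines.findIdx pvP190)).zipIdx i).foldl
      (fun idx p => if pvP140 p.1 then p.2 + 1 else idx) best =
    pvK lines i best := by
  induction lines generalizing i best with
  | nil => simp [pvK]
  | cons l r ih =>
    by_cases h9 : pvP190 l = true
    · have hf : List.findIdx pvP190 (l :: r) = 0 := by simp [List.findIdx_cons, h9]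
      have h4 : pvP140 l = false := by
        by_contra h; exact pvNot_both l (by simpa using h) h9
      rw [hf]
      simp [pvK, h4, h9]
    · have hf : List.findIdx pvP190 (l :: r) = List.findIdx pvP190 r + 1 := by
        simp [List.findIdx_cons, Bool.eq_false_iff.mpr h9]
      rw [hf]
      by_cases h4 : pvP140 l = true
      · simp only [List.take_succ_cons, List.zipIdx_cons, List.foldl_cons, h4, if_pos, pvK,
          Bool.eq_false_iff.mpr h9, Bool.false_eq_true, if_false]
        exact ih (i + 1) (i + 1)
      · simp only [List.take_succ_cons, List.zipIdx_cons, List.foldl_cons, pvK,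
          Bool.eq_false_iff.mpr h4, Bool.eq_false_iff.mpr h9, Bool.false_eq_true, if_false]
        exact ih (i + 1) best

theorem pvB_eq_splice (linhas reg : List String) :
    insert_0150_after_0140_alt linhas reg =
    linhas.take (pvK linhas 0 0) ++ reg ++ linhas.drop (pvK linhas 0 0) := by
  show (linhas.take (((linhas.take (linhas.findIdx pvP190)).zipIdx).foldl
        (fun idx p => if pvP140 p.1 then p.2 + 1 else idx) 0) ++ reg ++
      linhas.drop (((linhas.take (linhas.findIdx pvP190)).zipIdx).foldl
        (fun idx p => if pvP140 p.1 then p.2 + 1 else idx) 0)) = _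
  rw [show (linhas.take (linhas.findIdx pvP190)).zipIdx =
      (linhas.take (linhas.findIdx pvP190)).zipIdx 0 from rfl, pvB_idx]

-- ===== VERDICT (by name: the statement is the Claim_ definition above) =====
theorem insert_0150_after_0140_spec : Claim_equal_insert_0150_after_0140 := by
  intro linhas reg _
  unfold Spec_insert_0150_after_0140
  rw [pvA_eq_splice, pvB_eq_splice]
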